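-- pv_equiv track=rewrite | github.com/strazdinsg/advent-of-code-2024 | day08.py | get_antinodes
-- ===== SOURCE A (Python) =====
-- def get_antinodes(p1, p2, min_harmonics, max_harmonics, rows, cols):
--     dr = p1[0] - p2[0]
--     dc = p1[1] - p2[1]
--     antinodes = []
--     for i in range(min_harmonics, max_harmonics + 1):
--         p = (p1[0] + i * dr, p1[1] + i * dc)
--         if not is_within_bounds(p, rows, cols):
--             break
--         antinodes.append(p)
--     for i in range(min_harmonics, max_harmonics + 1):
--         p = (p2[0] - i * dr, p2[1] - i * dc)
--         if not is_within_bounds(p, rows, cols):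
--             break
--         antinodes.append(p)
--     return antinodes
--
-- def is_within_bounds(pos, rows, cols):
--     return 0 <= pos[0] < rows and 0 <= pos[1] < cols
-- ===== SOURCE B (Python) =====
-- def _tighten(lo, hi, x, s, b):
--     """Narrow the harmonic interval [lo, hi] so that 0 <= x + i*s < b for all i in it."""
--     if s == 0:
--         return (lo, hi) if 0 <= x < b else (lo, lo - 1)
--     if s > 0:
--         return (max(lo, -(x // s)), min(hi, (b - 1 - x) // s))
--     t = -s
--     return (max(lo, -((b - 1 - x) // t)), min(hi, x // t))
--
--
-- def _ray(start, sr, sc, min_harmonics, max_harmonics, rows, cols):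
--     lo, hi = _tighten(min_harmonics, max_harmonics, start[0], sr, rows)
--     lo, hi = _tighten(lo, hi, start[1], sc, cols)
--     if lo != min_harmonics:
--         return []
--     return [(start[0] + i * sr, start[1] + i * sc) for i in range(min_harmonics, hi + 1)]
--
--
-- def get_antinodes(p1, p2, min_harmonics, max_harmonics, rows, cols):
--     dr = p1[0] - p2[0]
--     dc = p1[1] - p2[1]
--     return (_ray(p1, dr, dc, min_harmonics, max_harmonics, rows, cols)
--             + _ray(p2, -dr, -dc, min_harmonics, max_harmonics, rows, cols))
-- ===== Notes on version B (the rewrite author's own statement) =====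
-- stated objective: alternative
-- what changed: B replaces A's two step-until-out-of-bounds scans with a closed-form computation: per axis it derives the harmonic interval via floor-division bounds, intersects them with [min_harmonics, max_harmonics], and emits the whole run with one range, instead of testing each point and breaking.
import Mathlib
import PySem

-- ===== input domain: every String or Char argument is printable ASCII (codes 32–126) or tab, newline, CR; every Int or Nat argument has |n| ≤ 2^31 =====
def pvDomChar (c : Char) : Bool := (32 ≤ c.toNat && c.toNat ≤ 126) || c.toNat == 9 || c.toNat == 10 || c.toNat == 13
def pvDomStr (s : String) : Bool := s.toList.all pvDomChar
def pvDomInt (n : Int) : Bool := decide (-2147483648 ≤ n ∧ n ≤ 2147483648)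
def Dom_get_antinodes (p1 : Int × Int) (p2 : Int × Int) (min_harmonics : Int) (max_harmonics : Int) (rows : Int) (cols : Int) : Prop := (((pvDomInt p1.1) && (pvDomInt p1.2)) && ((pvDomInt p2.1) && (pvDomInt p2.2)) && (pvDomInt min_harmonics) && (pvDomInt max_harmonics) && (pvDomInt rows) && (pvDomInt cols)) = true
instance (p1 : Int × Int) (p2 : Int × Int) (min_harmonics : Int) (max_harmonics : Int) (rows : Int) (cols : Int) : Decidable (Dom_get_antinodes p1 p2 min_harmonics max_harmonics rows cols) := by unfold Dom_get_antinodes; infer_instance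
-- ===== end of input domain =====

-- B replaces A's step-and-break scans with a closed-form harmonic interval per direction
-- (per-axis floor-division bounds intersected, then one range emission); objective: alternative.

-- ===== PORT A =====
def is_within_bounds (pos : Int × Int) (rows : Int) (cols : Int) : Bool :=
  decide (0 ≤ pos.1 ∧ pos.1 < rows) && decide (0 ≤ pos.2 ∧ pos.2 < cols)

-- the 'for i in range(...): ... if not ...: break; antinodes.append(p)' loop
-- (range is consumed lazily, as in Python: the next index is produced only if no break occurred)
def antinodeLoop (rows cols : Int) (point : Int → Int × Int) (acc : List (Int × Int)) (i stop : Int) : List (Int × Int) :=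
  if i < stop then
    let p := point i
    if is_within_bounds p rows cols then antinodeLoop rows cols point (acc ++ [p]) (i + 1) stop
    else acc
  else acc
termination_by (stop - i).toNat
decreasing_by omega

def get_antinodes (p1 : Int × Int) (p2 : Int × Int) (min_harmonics : Int) (max_harmonics : Int) (rows : Int) (cols : Int) : List (Int × Int) :=
  let dr := p1.1 - p2.1
  let dc := p1.2 - p2.2
  let antinodes := antinodeLoop rows cols (fun i => (p1.1 + i * dr, p1.2 + i * dc)) []
    min_harmonics (max_harmonics + 1)
  antinodeLoop rows cols (fun i => (p2.1 - i * dr, p2.2 - i * dc)) antinodes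
    min_harmonics (max_harmonics + 1)

-- ===== PORT B =====
-- narrow [lo, hi] so that 0 <= x + i*s < b for every i in it
def tighten (lo hi x s b : Int) : Int × Int :=
  if s = 0 then (if 0 ≤ x ∧ x < b then (lo, hi) else (lo, lo - 1))
  else if 0 < s then
    (max lo (-(PySem.Int.floordiv x s)), min hi (PySem.Int.floordiv (b - 1 - x) s))
  else
    (max lo (-(PySem.Int.floordiv (b - 1 - x) (-s))), min hi (PySem.Int.floordiv x (-s)))

def ray (start : Int × Int) (sr sc min_harmonics max_harmonics rows cols : Int) : List (Int × Int) :=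
  let t1 := tighten min_harmonics max_harmonics start.1 sr rows
  let t2 := tighten t1.1 t1.2 start.2 sc cols
  if t2.1 ≠ min_harmonics then []
  else (PySem.List.pyRange min_harmonics (t2.2 + 1) 1).map (fun i => (start.1 + i * sr, start.2 + i * sc))

def get_antinodes_alt (p1 : Int × Int) (p2 : Int × Int) (min_harmonics : Int) (max_harmonics : Int) (rows : Int) (cols : Int) : List (Int × Int) :=
  let dr := p1.1 - p2.1
  let dc := p1.2 - p2.2
  ray p1 dr dc min_harmonics max_harmonics rows cols
    ++ ray p2 (-dr) (-dc) min_harmonics max_harmonics rows cols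

-- ===== PRECONDITION & SPEC =====
def Spec_get_antinodes (p1 : Int × Int) (p2 : Int × Int) (min_harmonics : Int) (max_harmonics : Int) (rows : Int) (cols : Int) (out : List (Int × Int)) : Prop := out = get_antinodes_alt p1 p2 min_harmonics max_harmonics rows cols
instance (p1 : Int × Int) (p2 : Int × Int) (min_harmonics : Int) (max_harmonics : Int) (rows : Int) (cols : Int) (out : List (Int × Int)) : Decidable (Spec_get_antinodes p1 p2 min_harmonics max_harmonics rows cols out) := by unfold Spec_get_antinodes; infer_instance

-- ===== CLAIM (what is proved, stated in full; the proofs are below) =====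
def Claim_equal_get_antinodes : Prop := ∀ (p1 : Int × Int) (p2 : Int × Int) (min_harmonics : Int) (max_harmonics : Int) (rows : Int) (cols : Int), Dom_get_antinodes p1 p2 min_harmonics max_harmonics rows cols → Spec_get_antinodes p1 p2 min_harmonics max_harmonics rows cols (get_antinodes p1 p2 min_harmonics max_harmonics rows cols)

-- ===== LEMMAS AND PROOFS =====

lemma antinodeLoop_eq_takeWhile (rows cols : Int) (point : Int → Int × Int) (stop : Int) :
    ∀ (n : Nat) (i : Int) (acc : List (Int × Int)), (stop - i).toNat ≤ n →
      antinodeLoop rows cols point acc i stop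
        = acc ++ ((PySem.List.pyRange i stop 1).takeWhile
            (fun j => is_within_bounds (point j) rows cols)).map point := by
  intro n
  induction n with
  | zero =>
    intro i acc hn
    rw [antinodeLoop, if_neg (by omega : ¬ i < stop), PySem.List.pyRange_one_eq_nil (by omega)]
    simp
  | succ n ih =>
    intro i acc hn
    rw [antinodeLoop]
    by_cases his : i < stop
    · rw [if_pos his, PySem.List.pyRange_one_cons his, List.takeWhile_cons]
      by_cases h : is_within_bounds (point i) rows cols
      · simp only [h]
        rw [ih (i + 1) (acc ++ [point i]) (by omega)]
        simp
      · simp [h]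
    · rw [if_neg his, PySem.List.pyRange_one_eq_nil (by omega)]
      simp

lemma tighten_mem (lo0 hi0 x s b i : Int) :
    ((tighten lo0 hi0 x s b).1 ≤ i ∧ i ≤ (tighten lo0 hi0 x s b).2) ↔
      (lo0 ≤ i ∧ i ≤ hi0 ∧ 0 ≤ x + i * s ∧ x + i * s < b) := by
  rcases lt_trichotomy s 0 with hs | hs | hs
  · have ht : (0:Int) < -s := by omega
    simp only [tighten, if_neg (by omega : ¬ s = 0), if_neg (by omega : ¬ 0 < s),
      max_le_iff, le_min_iff, neg_le]
    rw [PySem.Int.le_floordiv_iff_mul_le ht,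
      show (i ≤ PySem.Int.floordiv x (-s)) ↔ ¬ (PySem.Int.floordiv x (-s) < i + 1 - 1) by omega,
      show (i + 1 - 1) = i from by omega,
      PySem.Int.floordiv_lt_iff_lt_mul ht]
    have e1 : (-i) * (-s) = i * s := by ring
    have e2 : i * (-s) = -(i * s) := by ring
    rw [e1, e2]
    generalize i * s = m
    omega
  · subst hs
    by_cases hx : 0 ≤ x ∧ x < b <;> simp [tighten, hx, mul_zero]
  · simp only [tighten, if_neg (by omega : ¬ s = 0), if_pos hs, max_le_iff, le_min_iff, neg_le]
    rw [PySem.Int.le_floordiv_iff_mul_le hs,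
      show (i ≤ PySem.Int.floordiv (b - 1 - x) s) ↔ ¬ (PySem.Int.floordiv (b - 1 - x) s < i + 1 - 1) by omega,
      show (i + 1 - 1) = i from by omega,
      PySem.Int.floordiv_lt_iff_lt_mul hs]
    have e1 : (-i) * s = -(i * s) := by ring
    rw [e1]
    generalize i * s = m
    omega

lemma tighten_lo (lo0 hi0 x s b : Int) : lo0 ≤ (tighten lo0 hi0 x s b).1 := by
  unfold tighten; split_ifs <;> simp

lemma tighten_hi (lo0 hi0 x s b : Int) :
    (tighten lo0 hi0 x s b).2 ≤ hi0 ∨ (tighten lo0 hi0 x s b).2 = lo0 - 1 := by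
  unfold tighten; split_ifs <;> simp

lemma takeWhile_pyRange (p : Int → Bool) (hi : Int) :
    ∀ (n : Nat) (a b : Int), b - a ≤ n → (∀ i, a ≤ i → i < b → (p i = true ↔ i ≤ hi)) →
      (PySem.List.pyRange a b 1).takeWhile p = PySem.List.pyRange a (min b (hi + 1)) 1 := by
  intro n
  induction n with
  | zero =>
    intro a b hb _
    rw [PySem.List.pyRange_one_eq_nil (by omega), PySem.List.pyRange_one_eq_nil (by omega)]
    rfl
  | succ n ih =>
    intro a b hb h
    by_cases hab : a < b
    · rw [PySem.List.pyRange_one_cons hab, List.takeWhile_cons]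
      by_cases hp : p a = true
      · have ha : a ≤ hi := (h a le_rfl hab).mp hp
        rw [if_pos hp, ih (a + 1) b (by omega) (fun i h1 h2 => h i (by omega) h2),
          PySem.List.pyRange_one_cons (show a < min b (hi + 1) by omega)]
      · have ha : ¬ a ≤ hi := fun hle => hp ((h a le_rfl hab).mpr hle)
        rw [if_neg hp, PySem.List.pyRange_one_eq_nil (show min b (hi + 1) ≤ a by omega)]
    · rw [PySem.List.pyRange_one_eq_nil (by omega), PySem.List.pyRange_one_eq_nil (by omega)]
      rfl

lemma loop_eq_ray (base : Int × Int) (sr sc mh Mh rows cols : Int) (acc : List (Int × Int)) :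
    antinodeLoop rows cols (fun i => (base.1 + i * sr, base.2 + i * sc)) acc mh (Mh + 1)
      = acc ++ ray base sr sc mh Mh rows cols := by
  rw [antinodeLoop_eq_takeWhile rows cols _ (Mh + 1) (Mh + 1 - mh).toNat mh acc (by omega)]
  congr 1
  set t1 := tighten mh Mh base.1 sr rows with ht1
  set t2 := tighten t1.1 t1.2 base.2 sc cols with ht2
  have char : ∀ i : Int, (t2.1 ≤ i ∧ i ≤ t2.2) ↔
      (mh ≤ i ∧ i ≤ Mh ∧ (0 ≤ base.1 + i * sr ∧ base.1 + i * sr < rows) ∧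
        (0 ≤ base.2 + i * sc ∧ base.2 + i * sc < cols)) := by
    intro i
    have m1 := tighten_mem mh Mh base.1 sr rows i
    have m2 := tighten_mem t1.1 t1.2 base.2 sc cols i
    rw [← ht1] at m1
    rw [← ht2] at m2
    tauto
  have wchar : ∀ i : Int, mh ≤ i → i ≤ Mh →
      ((is_within_bounds (base.1 + i * sr, base.2 + i * sc) rows cols = true) ↔
        (t2.1 ≤ i ∧ i ≤ t2.2)) := by
    intro i h1 h2
    rw [char i]
    simp only [is_within_bounds, Bool.and_eq_true, decide_eq_true_eq]
    tauto
  have hlo1 : mh ≤ t1.1 := tighten_lo _ _ _ _ _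
  have hlo2 : t1.1 ≤ t2.1 := tighten_lo _ _ _ _ _
  by_cases hemit : t2.1 = mh
  · -- emitted interval starts at mh
    have hhi : t2.2 ≤ Mh ∨ t2.2 + 1 ≤ mh := by
      have h2 := tighten_hi t1.1 t1.2 base.2 sc cols
      have h1 := tighten_hi mh Mh base.1 sr rows
      rw [← ht1] at h1
      rw [← ht2] at h2
      omega
    rw [takeWhile_pyRange _ t2.2 (Mh + 1 - mh).toNat mh (Mh + 1) (by omega)
      (fun i hi1 hi2 => by
        rw [wchar i hi1 (by omega)]
        omega)]
    simp only [ray, ← ht1, ← ht2, if_neg (show ¬ t2.1 ≠ mh from by omega)]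
    rcases hhi with hle | hsm
    · rw [show min (Mh + 1) (t2.2 + 1) = t2.2 + 1 from by omega]
    · rw [PySem.List.pyRange_one_eq_nil (show min (Mh + 1) (t2.2 + 1) ≤ mh from by omega),
        PySem.List.pyRange_one_eq_nil (show t2.2 + 1 ≤ mh from by omega)]
  · -- interval does not start at mh: nothing is emitted
    have hray : ray base sr sc mh Mh rows cols = [] := by
      simp only [ray, ← ht1, ← ht2, if_pos (show t2.1 ≠ mh from hemit)]
    rw [hray]
    by_cases hmb : mh < Mh + 1
    · rw [PySem.List.pyRange_one_cons hmb, List.takeWhile_cons]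
      have : ¬ is_within_bounds (base.1 + mh * sr, base.2 + mh * sc) rows cols = true := by
        rw [wchar mh le_rfl (by omega)]
        omega
      simp [this]
    · rw [PySem.List.pyRange_one_eq_nil (by omega)]
      rfl

-- ===== VERDICT (by name: the statement is the Claim_ definition above) =====
theorem get_antinodes_spec : Claim_equal_get_antinodes := by
  intro p1 p2 mh Mh rows cols _
  show get_antinodes p1 p2 mh Mh rows cols = get_antinodes_alt p1 p2 mh Mh rows cols
  unfold get_antinodes get_antinodes_alt
  dsimp only
  have hfun : (fun i => (p2.1 - i * (p1.1 - p2.1), p2.2 - i * (p1.2 - p2.2)))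
      = (fun i : Int => (p2.1 + i * (-(p1.1 - p2.1)), p2.2 + i * (-(p1.2 - p2.2)))) := by
    funext i
    simp only [Prod.mk.injEq]
    constructor <;> ring
  rw [hfun, loop_eq_ray, loop_eq_ray]
  simp
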